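-- pv_equiv track=rewrite | github.com/hannesbachmann/aoc_2023 | december_09.py | calc_levels
-- ===== SOURCE A (Python) =====
-- def calc_levels(line: list[int]) -> list[list[int]]:
--     l_idx = 0
--     levels = []
--     current_line = line
--     levels.append(current_line)
--     while not all(l == 0 for l in levels[l_idx]):
--         current_line = [j - i for i, j in zip(current_line[:-1], current_line[1:])]
--         levels.append(current_line)
--         l_idx += 1
--     return levels
-- ===== SOURCE B (Python) =====
-- def calc_levels(line: list[int]) -> list[list[int]]:
--     # recursive formulation of the same finite-difference levels
--     if all(x == 0 for x in line):
--         return [line]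
--     diffs = [line[i + 1] - line[i] for i in range(len(line) - 1)]
--     return [line] + calc_levels(diffs)
-- ===== Notes on version B (the rewrite author's own statement) =====
-- stated objective: simpler
-- what changed: Replaces A's while-loop with index bookkeeping and list accumulation by a direct structural recursion on the shrinking sequence (base case: all-zero row), with the diff row built by index comprehension instead of zip of two slices.
import Mathlib
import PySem

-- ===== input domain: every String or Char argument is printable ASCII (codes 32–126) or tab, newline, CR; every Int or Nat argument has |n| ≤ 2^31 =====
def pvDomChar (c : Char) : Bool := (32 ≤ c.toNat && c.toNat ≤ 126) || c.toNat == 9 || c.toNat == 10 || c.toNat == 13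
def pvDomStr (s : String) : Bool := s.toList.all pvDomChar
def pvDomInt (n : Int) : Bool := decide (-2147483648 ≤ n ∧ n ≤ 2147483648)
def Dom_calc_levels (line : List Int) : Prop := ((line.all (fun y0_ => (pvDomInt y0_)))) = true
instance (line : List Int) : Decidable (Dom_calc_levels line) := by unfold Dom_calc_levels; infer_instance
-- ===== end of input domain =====

-- ===== PORT A =====
-- header: B replaces A's while-loop accumulation by a direct recursion on the shrinking
-- sequence (simpler decomposition); return values proved equal on all inputs.

-- current_line = [j - i for i, j in zip(current_line[:-1], current_line[1:])]
def pvDiffA (cur : List Int) : List Int :=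
  ((PySem.List.slice cur none (some (-1))).zip (PySem.List.slice cur (some 1) none)).map
    (fun p => p.2 - p.1)

theorem pvDiffA_length (cur : List Int) : (pvDiffA cur).length = cur.length - 1 := by
  simp [pvDiffA, PySem.List.slice_to_neg_one, PySem.List.slice_from_one]

-- the while loop of A; Python's `levels[l_idx]` is always the last appended row,
-- i.e. `current_line`, so the condition is stated on `cur` directly
def calc_levels_loop (cur : List Int) (levels : List (List Int)) : List (List Int) :=
  if cur.all (fun l => l == 0) then levels
  else
    let nxt := pvDiffA cur
    calc_levels_loop nxt (levels ++ [nxt])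
termination_by cur.length
decreasing_by
  have h1 : cur ≠ [] := by rintro rfl; simp_all
  have := pvDiffA_length cur
  have : 0 < cur.length := List.length_pos_iff.mpr h1
  omega

def calc_levels (line : List Int) : List (List Int) :=
  calc_levels_loop line ([] ++ [line])

-- ===== PORT B =====
-- diffs = [line[i + 1] - line[i] for i in range(len(line) - 1)]
-- (indices i and i+1 are always in range, so the pyGetD default 0 is never used)
def pvDiffB (l : List Int) : List Int :=
  (PySem.List.pyRange 0 ((l.length : Int) - 1) 1).map
    (fun i => PySem.List.pyGetD l (i + 1) 0 - PySem.List.pyGetD l i 0)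

theorem pvDiffB_length (l : List Int) : (pvDiffB l).length = l.length - 1 := by
  simp [pvDiffB, PySem.List.length_pyRange_one]

def calc_levels_alt (line : List Int) : List (List Int) :=
  if line.all (fun x => x == 0) then [line]
  else line :: calc_levels_alt (pvDiffB line)
termination_by line.length
decreasing_by
  have h1 : line ≠ [] := by rintro rfl; simp_all
  have := pvDiffB_length line
  have : 0 < line.length := List.length_pos_iff.mpr h1
  omega

-- ===== PRECONDITION & SPEC =====
def Spec_calc_levels (line : List Int) (out : List (List Int)) : Prop := out = calc_levels_alt line
instance (line : List Int) (out : List (List Int)) : Decidable (Spec_calc_levels line out) := by unfold Spec_calc_levels; infer_instance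

-- ===== CLAIM (what is proved, stated in full; the proofs are below) =====
def Claim_equal_calc_levels : Prop := ∀ (line : List Int), Dom_calc_levels line → Spec_calc_levels line (calc_levels line)

-- ===== LEMMAS AND PROOFS =====

theorem pvDiff_eq (l : List Int) : pvDiffA l = pvDiffB l := by
  apply List.ext_getElem
  · rw [pvDiffA_length, pvDiffB_length]
  · intro i h1 h2
    rw [pvDiffA_length] at h1
    simp only [pvDiffA, pvDiffB, PySem.List.slice_to_neg_one, PySem.List.slice_from_one,
      List.getElem_map, List.getElem_zip, PySem.List.getElem_pyRange_one, zero_add]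
    have hi1 : ((i : Int) + 1) = ((i + 1 : Nat) : Int) := by push_cast; ring
    rw [hi1, PySem.List.pyGetD_natCast, PySem.List.pyGetD_natCast]
    rw [List.getElem_dropLast, List.getElem_tail]
    rw [List.getD_eq_getElem _ _ (by omega), List.getD_eq_getElem _ _ (by omega)]

theorem alt_head (l : List Int) : calc_levels_alt l = l :: (calc_levels_alt l).tail := by
  rw [calc_levels_alt]
  split <;> simp

theorem loop_eq (n : Nat) (cur : List Int) (acc : List (List Int)) (h : cur.length ≤ n) :
    calc_levels_loop cur acc = acc ++ (calc_levels_alt cur).tail := by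
  induction n generalizing cur acc with
  | zero =>
    have : cur = [] := by cases cur <;> simp_all
    subst this
    rw [calc_levels_loop, calc_levels_alt]
    simp
  | succ n ih =>
    rw [calc_levels_loop, calc_levels_alt]
    by_cases hz : cur.all (fun l => l == 0)
    · simp [hz]
    · simp only [hz, if_neg, Bool.false_eq_true, not_false_eq_true, List.tail_cons]
      have hne : cur ≠ [] := by rintro rfl; simp_all
      have hlen : (pvDiffA cur).length ≤ n := by
        have := pvDiffA_length cur
        have : 0 < cur.length := List.length_pos_iff.mpr hne
        omega
      rw [ih _ _ hlen, pvDiff_eq, alt_head (pvDiffB cur)]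
      simp

-- ===== VERDICT (by name: the statement is the Claim_ definition above) =====
theorem calc_levels_spec : Claim_equal_calc_levels := by
  intro line _
  unfold Spec_calc_levels calc_levels
  rw [loop_eq line.length _ _ le_rfl, alt_head line]
  simp
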